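-- pv_equiv track=rewrite | github.com/PashaKopka/logger | logger.py | make_log_string
-- ===== SOURCE A (Python) =====
-- def make_log_string(names: list, values: list, fields: list) -> str:
--     names = [(value if value in names else '') for value in fields]
--     string = ''
--     i = 0
--     for name, arg in zip(names, values):
--         if (i % 3) == 0 and i:
--             string += '\n' + ' ' * (len(values[0]) + 3) if (len(values[0]) <= 10) else 10
--
--         if name:
--             string += f'[{name.title()}: {arg}] '
--         else:
--             string += f'[{arg}] '
--         i += 1
--
--     return string + '\n'
-- ===== SOURCE B (Python) =====
-- def make_log_string(names: list, values: list, fields: list) -> str: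
--     labels = ['' if f not in names else f for f in fields]
--     pairs = list(zip(labels, values))
--     chunks = [pairs[k:k + 3] for k in range(0, len(pairs), 3)]
--     out = ''
--     first = True
--     for chunk in chunks:
--         if not first:
--             out += '\n' + ' ' * (len(values[0]) + 3)
--         first = False
--         for name, arg in chunk:
--             out += f'[{name.title()}: {arg}] ' if name else f'[{arg}] '
--     return out + '\n'
-- ===== Notes on version B (the rewrite author's own statement) =====
-- stated objective: alternative
-- what changed: Replaces the single pass with a modulo counter by slicing the zipped (label,value) pairs into chunks of three and a nested loop with a first-chunk flag; the separator is emitted once per later chunk without the counter arithmetic.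
import Mathlib
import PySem

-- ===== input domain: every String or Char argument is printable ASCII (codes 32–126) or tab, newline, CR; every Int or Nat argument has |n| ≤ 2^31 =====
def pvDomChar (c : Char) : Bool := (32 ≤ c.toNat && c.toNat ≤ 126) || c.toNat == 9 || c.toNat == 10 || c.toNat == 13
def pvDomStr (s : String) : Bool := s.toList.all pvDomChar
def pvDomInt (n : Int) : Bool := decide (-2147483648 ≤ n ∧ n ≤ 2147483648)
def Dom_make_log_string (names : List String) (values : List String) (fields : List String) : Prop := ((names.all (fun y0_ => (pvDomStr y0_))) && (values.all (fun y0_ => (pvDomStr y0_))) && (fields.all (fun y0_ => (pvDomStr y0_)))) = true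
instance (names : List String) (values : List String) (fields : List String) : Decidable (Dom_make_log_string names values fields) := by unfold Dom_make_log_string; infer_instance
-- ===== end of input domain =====

-- B replaces A's modulo-counter single pass by a nested loop over chunks of three pairs (alternative decomposition, same cost).

-- ===== PORT A =====
-- str.title(), exact on the ASCII domain: a char after a cased (ASCII-alpha) char is lowercased, otherwise uppercased
def pvTitleGo : List Char → Bool → List Char
  | [], _ => []
  | c :: cs, prevCased => (if prevCased then c.toLower else c.toUpper) :: pvTitleGo cs c.isAlpha

-- f'[{name.title()}: {arg}] ' / f'[{arg}] ' — the pair-formatting expression both Pythons contain verbatim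
def pvFmtPair (p : String × String) : List Char :=
  if p.1 ≠ "" then '[' :: pvTitleGo p.1.toList false ++ (':' :: ' ' :: p.2.toList) ++ [']', ' ']
  else '[' :: p.2.toList ++ [']', ' ']

-- A's separator expression; when len(values[0]) > 10 Python's 'string += 10' raises TypeError (excluded by Pre_), modelled as [].
def pvSepA (values : List String) : List Char :=
  if (values.headD "").toList.length ≤ 10 then
    '\n' :: List.replicate ((values.headD "").toList.length + 3) ' '
  else []

-- the 'for name, arg in zip(names, values)' loop, state = (string, i)
def pvLoopA (values : List String) : List (String × String) → List Char → Nat → List Char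
  | [], s, _ => s
  | p :: rest, s, i =>
      let s := if i % 3 == 0 && i != 0 then s ++ pvSepA values else s
      pvLoopA values rest (s ++ pvFmtPair p) (i + 1)

def make_log_string (names : List String) (values : List String) (fields : List String) : String :=
  let names2 := fields.map (fun value => if names.contains value then value else "")
  String.ofList (pvLoopA values (names2.zip values) [] 0 ++ ['\n'])

-- ===== PORT B =====
-- B's separator: '\n' + ' ' * (len(values[0]) + 3)
def pvSepB (values : List String) : List Char :=
  '\n' :: List.replicate ((values.headD "").toList.length + 3) ' '

-- [pairs[k:k+3] for k in range(0, len(pairs), 3)]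
def pvChunk3 {α : Type} : List α → List (List α)
  | [] => []
  | [a] => [[a]]
  | [a, b] => [[a, b]]
  | a :: b :: c :: rest => [a, b, c] :: pvChunk3 rest

def make_log_string_alt (names : List String) (values : List String) (fields : List String) : String :=
  let labels := fields.map (fun f => if !(names.contains f) then "" else f)
  let pairs := labels.zip values
  let r := (pvChunk3 pairs).foldl
    (fun (st : List Char × Bool) chunk =>
      let out := if !st.2 then st.1 ++ pvSepB values else st.1
      (chunk.foldl (fun a p => a ++ pvFmtPair p) out, false))
    ([], true)
  String.ofList (r.1 ++ ['\n'])

-- ===== PRECONDITION & SPEC =====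
-- Pre_ excludes exactly the inputs where A raises TypeError: a separator is reached (more than 3 zipped pairs)
-- while len(values[0]) > 10, so A's ternary yields the int 10 and 'string += 10' raises.
def Pre_make_log_string (names : List String) (values : List String) (fields : List String) : Prop :=
  min fields.length values.length ≤ 3 ∨ (values.headD "").toList.length ≤ 10
instance (names : List String) (values : List String) (fields : List String) : Decidable (Pre_make_log_string names values fields) := by unfold Pre_make_log_string; infer_instance

def pvWitness_make_log_string : List String × List String × List String :=
  (["user"], ["alice", "7", "ok", "x"], ["user", "time", "msg", "id"])


def Spec_make_log_string (names : List String) (values : List String) (fields : List String) (out : String) : Prop := out = make_log_string_alt names values fields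
instance (names : List String) (values : List String) (fields : List String) (out : String) : Decidable (Spec_make_log_string names values fields out) := by unfold Spec_make_log_string; infer_instance

-- ===== CLAIM (what is proved, stated in full; the proofs are below) =====
def Claim_equal_make_log_string : Prop := ∀ (names : List String) (values : List String) (fields : List String), Dom_make_log_string names values fields → Pre_make_log_string names values fields → Spec_make_log_string names values fields (make_log_string names values fields)

-- ===== LEMMAS AND PROOFS =====

-- proof-only abbreviations
def pvStep (a : List Char) (p : String × String) : List Char := a ++ pvFmtPair p

def pvG (values : List String) (a : List Char) (c : List (String × String)) : List Char :=
  c.foldl pvStep (a ++ pvSepB values)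

def pvStepB (values : List String) (st : List Char × Bool) (chunk : List (String × String)) : List Char × Bool :=
  let out := if !st.2 then st.1 ++ pvSepB values else st.1
  (chunk.foldl (fun a p => a ++ pvFmtPair p) out, false)

theorem foldB_false (values : List String) (cs : List (List (String × String))) (s : List Char) :
    (cs.foldl (pvStepB values) (s, false)).1 = cs.foldl (pvG values) s := by
  induction cs generalizing s with
  | nil => rfl
  | cons c cs ih =>
      simp only [List.foldl_cons]
      have h : pvStepB values (s, false) c = (pvG values s c, false) := rfl
      rw [h, ih]

theorem loopA_chunks (values : List String) (h : pvSepA values = pvSepB values)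
    (pairs : List (String × String)) :
    ∀ (s : List Char) (j : Nat), j % 3 = 0 → j ≠ 0 →
      pvLoopA values pairs s j = (pvChunk3 pairs).foldl (pvG values) s := by
  induction pairs using pvChunk3.induct with
  | case1 => intro s j _ _; rfl
  | case2 p =>
      intro s j hj hj0
      have e0 : (j % 3 == 0 && j != 0) = true := by simp [hj, hj0]
      simp [pvLoopA, pvChunk3, pvG, pvStep, e0, h]
  | case3 p q =>
      intro s j hj hj0
      have e0 : (j % 3 == 0 && j != 0) = true := by simp [hj, hj0]
      have m1 : (j + 1) % 3 = 1 := by omega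
      simp [pvLoopA, pvChunk3, pvG, pvStep, e0, m1, h]
  | case4 p q r rest ih =>
      intro s j hj hj0
      have e0 : (j % 3 == 0 && j != 0) = true := by simp [hj, hj0]
      have m1 : (j + 1) % 3 = 1 := by omega
      simp only [pvLoopA]
      rw [if_pos e0, if_neg (by simp; omega), if_neg (by simp; omega)]
      rw [ih _ (j + 1 + 1 + 1) (by omega) (by omega)]
      simp [pvChunk3, pvG, pvStep, h]

theorem loopA_eq_foldB (values : List String) (h : pvSepA values = pvSepB values)
    (pairs : List (String × String)) :
    pvLoopA values pairs [] 0 = ((pvChunk3 pairs).foldl (pvStepB values) ([], true)).1 := by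
  match pairs with
  | [] => rfl
  | [p] => simp [pvLoopA, pvChunk3, pvStepB]
  | [p, q] => simp [pvLoopA, pvChunk3, pvStepB]
  | p :: q :: r :: rest =>
      simp only [pvLoopA, pvChunk3, List.foldl_cons]
      rw [if_neg (by simp), if_neg (by simp), if_neg (by simp)]
      rw [loopA_chunks values h rest _ (0 + 1 + 1 + 1) (by omega) (by omega)]
      have hstep : pvStepB values ([], true) [p, q, r]
          = (([] : List Char) ++ pvFmtPair p ++ pvFmtPair q ++ pvFmtPair r, false) := by
        simp [pvStepB]
      rw [hstep, foldB_false]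

theorem pvLoopA_short (values : List String) (pairs : List (String × String))
    (hlen : pairs.length ≤ 3) :
    pvLoopA values pairs [] 0 = ((pvChunk3 pairs).foldl (pvStepB values) ([], true)).1 := by
  match pairs with
  | [] => rfl
  | [p] => simp [pvLoopA, pvChunk3, pvStepB]
  | [p, q] => simp [pvLoopA, pvChunk3, pvStepB]
  | [p, q, r] => simp [pvLoopA, pvChunk3, pvStepB]
  | p :: q :: r :: t :: rest => simp at hlen; omega

theorem make_log_string_spec : Claim_equal_make_log_string := by
  intro names values fields _ hpre
  unfold Spec_make_log_string
  have hmap : fields.map (fun value => if names.contains value then value else "")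
      = fields.map (fun f => if !(names.contains f) then "" else f) := by
    apply List.map_congr_left
    intro f _
    cases names.contains f <;> simp
  have key : ∀ pairs : List (String × String), pairs.length ≤ 3 ∨ (values.headD "").toList.length ≤ 10 →
      pvLoopA values pairs [] 0 = ((pvChunk3 pairs).foldl (pvStepB values) ([], true)).1 := by
    intro pairs hp
    by_cases hsep : (values.headD "").toList.length ≤ 10
    · exact loopA_eq_foldB values (by unfold pvSepA pvSepB; rw [if_pos hsep]) pairs
    · exact pvLoopA_short values pairs (by omega)
  show String.ofList (pvLoopA values ((fields.map (fun value => if names.contains value then value else "")).zip values) [] 0 ++ ['\n'])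
      = String.ofList (((pvChunk3 ((fields.map (fun f => if !(names.contains f) then "" else f)).zip values)).foldl (pvStepB values) ([], true)).1 ++ ['\n'])
  rw [hmap]
  congr 2
  apply key
  unfold Pre_make_log_string at hpre
  have : ((fields.map (fun f => if !(names.contains f) then "" else f)).zip values).length
      = min fields.length values.length := by simp
  omega
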